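-- pv_equiv track=rewrite | github.com/hk-bae/coding-test | programmers/17680.py | solution
-- ===== SOURCE A (Python) =====
-- from collections import deque
--
-- def solution(cacheSize, cities):
--     time = 0
--
--     n = len(cities) #  도시 크기
--
--     size = 0
--     in_memory = dict()
--     queue = deque()
--
--     for i in range(n):
--         city = cities[i].lower()
--
--         if city in in_memory.keys() : # 메모리 내에 존재
--             time += 1 # cache hit!
--             queue.append(city)
--             in_memory[city] += 1
--         else : # 메모리에 없음
--             time += 5 # cache miss!
--             in_memory[city] = 1
--             queue.append(city)
--             size += 1
--             if size > cacheSize : # 캐시 꽉참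
--                 while size > cacheSize :
--                     target = queue.popleft()
--                     if in_memory[target] == 1 :
--                         in_memory.pop(target) # 제거
--                         size -= 1
--                     else :
--                         in_memory[target] -= 1 # 1 감소
--
--     return time
-- ===== SOURCE B (Python) =====
-- from collections import OrderedDict
--
-- def solution(cacheSize, cities):
--     # Standard LRU cache: an ordered dict, least recently used first.
--     time = 0
--     cache = OrderedDict()
--     for name in cities:
--         city = name.lower()
--         if city in cache:
--             time += 1
--             cache.move_to_end(city)
--         else:
--             time += 5
--             if cacheSize > 0:
--                 cache[city] = True
--                 if len(cache) > cacheSize: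
--                     cache.popitem(last=False)
--     return time
-- ===== Notes on version B (the rewrite author's own statement) =====
-- stated objective: idiomatic
-- what changed: Replaced A's queue of access copies plus reference-count dict plus explicit size counter (with a lazy pop-front eviction loop) by the standard OrderedDict LRU cache whose eviction pops exactly one least-recently-used entry.
import Mathlib
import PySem

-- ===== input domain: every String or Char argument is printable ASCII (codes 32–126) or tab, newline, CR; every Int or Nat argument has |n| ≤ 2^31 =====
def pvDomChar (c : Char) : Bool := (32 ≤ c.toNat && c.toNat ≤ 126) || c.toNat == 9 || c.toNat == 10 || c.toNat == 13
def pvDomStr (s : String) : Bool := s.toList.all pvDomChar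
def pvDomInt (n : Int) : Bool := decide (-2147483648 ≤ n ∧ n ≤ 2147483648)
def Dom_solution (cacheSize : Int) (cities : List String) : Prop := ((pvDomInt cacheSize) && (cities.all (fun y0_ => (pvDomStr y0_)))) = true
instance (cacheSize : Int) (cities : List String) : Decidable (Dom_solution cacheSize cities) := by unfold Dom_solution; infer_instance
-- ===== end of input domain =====

-- B replaces A's access-queue + reference-count dict + size counter (lazy pop-front
-- eviction loop) with the standard OrderedDict LRU cache, evicting exactly one entry (idiomatic).

-- ===== PORT A =====
-- the 'while size > cacheSize' eviction loop, recursing on the queue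
-- (when the queue is empty and size > cacheSize Python raises IndexError; Pre_ excludes that)
def evictA (cS : Int) : List String → Int → PySem.Dict String Int → List String × Int × PySem.Dict String Int
  | [], size, mem => ([], size, mem)
  | t :: rest, size, mem =>
    if size > cS then
      if mem.getD t 0 == 1 then
        evictA cS rest (size - 1) (mem.erase t)
      else
        evictA cS rest size (mem.insert t (mem.getD t 0 - 1))
    else (t :: rest, size, mem)

def stepA (cS : Int) (st : Int × Int × PySem.Dict String Int × List String) (name : String) :
    Int × Int × PySem.Dict String Int × List String :=
  let city := PySem.Str.lower name
  match st with
  | (time, size, mem, q) =>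
    if (PySem.Dict.keys mem).contains city then
      (time + 1, size, mem.insert city (mem.getD city 0 + 1), q ++ [city])
    else
      let mem' := mem.insert city 1
      let q' := q ++ [city]
      let size' := size + 1
      if size' > cS then
        match evictA cS q' size' mem' with
        | (q'', size'', mem'') => (time + 5, size'', mem'', q'')
      else (time + 5, size', mem', q')

def solution (cacheSize : Int) (cities : List String) : Int :=
  (cities.foldl (stepA cacheSize) (0, 0, PySem.Dict.empty, [])).1

-- ===== PORT B =====
def stepB (cS : Int) (st : Int × PySem.Dict String Bool) (name : String) :
    Int × PySem.Dict String Bool :=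
  let city := PySem.Str.lower name
  match st with
  | (time, cache) =>
    if cache.contains city then
      -- cache.move_to_end(city): exact for OrderedDict — delete the entry, re-append at the end
      (time + 1, (cache.erase city).insert city true)
    else
      if cS > 0 then
        let cache' := cache.insert city true
        if ((PySem.Dict.size cache' : Nat) : Int) > cS then
          -- cache.popitem(last=False): exact for OrderedDict — drop the first (LRU) item
          (time + 5, PySem.Dict.mk (cache'.items.drop 1))
        else (time + 5, cache')
      else (time + 5, cache)

def solution_alt (cacheSize : Int) (cities : List String) : Int :=
  (cities.foldl (stepB cacheSize) (0, PySem.Dict.empty)).1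

-- ===== PRECONDITION & SPEC =====
-- Pre_ excludes only cacheSize < 0 with nonempty cities, where A's eviction loop
-- pops from an exhausted queue and raises IndexError.
def Pre_solution (cacheSize : Int) (cities : List String) : Prop :=
  0 ≤ cacheSize ∨ cities = []
instance (cacheSize : Int) (cities : List String) : Decidable (Pre_solution cacheSize cities) := by
  unfold Pre_solution; infer_instance
def pvWitness_solution : Int × List String := (2, ["Rome", "PARIS", "rome"])


def Spec_solution (cacheSize : Int) (cities : List String) (out : Int) : Prop :=
  out = solution_alt cacheSize cities
instance (cacheSize : Int) (cities : List String) (out : Int) : Decidable (Spec_solution cacheSize cities out) := by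
  unfold Spec_solution; infer_instance

-- ===== CLAIM (what is proved, stated in full; the proofs are below) =====
def Claim_equal_solution : Prop := ∀ (cacheSize : Int) (cities : List String),
  Dom_solution cacheSize cities → Pre_solution cacheSize cities →
  Spec_solution cacheSize cities (solution cacheSize cities)


-- ===== LEMMAS AND PROOFS =====

-- B's cache update on a hit, and the abstraction of A's queue: folding it over the
-- queue yields the distinct cities of the queue in order of last occurrence.
def dstep (acc : List String) (c : String) : List String := acc.filter (fun x => x != c) ++ [c]
def dlist (q : List String) : List String := q.foldl dstep []

lemma mem_foldl_dstep (q : List String) : ∀ (acc : List String) (x : String),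
    x ∈ q.foldl dstep acc ↔ x ∈ q ∨ x ∈ acc := by
  induction q with
  | nil => simp
  | cons c q ih =>
    intro acc x
    simp only [List.foldl_cons, ih, dstep, List.mem_append, List.mem_filter,
      List.mem_cons, bne_iff_ne, ne_eq]
    by_cases hx : x = c <;> simp [hx]

lemma mem_dlist (q : List String) (x : String) : x ∈ dlist q ↔ x ∈ q := by
  simp [dlist, mem_foldl_dstep]

lemma nodup_foldl_dstep (q : List String) : ∀ acc : List String,
    acc.Nodup → (q.foldl dstep acc).Nodup := by
  induction q with
  | nil => exact fun _ h => h
  | cons c q ih =>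
    intro acc hacc
    refine ih _ ?_
    simp only [dstep]
    refine List.Nodup.append (hacc.filter _) (List.nodup_singleton c) ?_
    intro x hx
    simp only [List.mem_filter, bne_iff_ne, ne_eq] at hx
    simpa using hx.2

lemma nodup_dlist (q : List String) : (dlist q).Nodup :=
  nodup_foldl_dstep q [] List.nodup_nil

lemma foldl_dstep_cons_of_not_mem (q : List String) : ∀ (acc : List String) (t : String),
    t ∉ q → q.foldl dstep (t :: acc) = t :: q.foldl dstep acc := by
  induction q with
  | nil => simp
  | cons c q ih =>
    intro acc t ht
    have htc : t ≠ c := fun h => ht (by simp [h])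
    have : dstep (t :: acc) c = t :: dstep acc c := by
      simp [dstep, htc]
    simp only [List.foldl_cons, this]
    exact ih _ t (fun h => ht (by simp [h]))

lemma foldl_dstep_cons_of_mem (q : List String) : ∀ (acc : List String) (t : String),
    t ∈ q → q.foldl dstep (t :: acc) = q.foldl dstep acc := by
  induction q with
  | nil => simp
  | cons c q ih =>
    intro acc t ht
    by_cases htc : t = c
    · subst htc
      have : dstep (t :: acc) t = dstep acc t := by simp [dstep]
      simp [List.foldl_cons, this]
    · have : dstep (t :: acc) c = t :: dstep acc c := by simp [dstep, htc]
      simp only [List.foldl_cons, this]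
      exact ih _ t ((List.mem_cons.1 ht).resolve_left htc)

lemma dlist_cons_of_not_mem {t : String} {q : List String} (h : t ∉ q) :
    dlist (t :: q) = t :: dlist q := by
  simpa [dlist] using foldl_dstep_cons_of_not_mem q [] t h

lemma dlist_cons_of_mem {t : String} {q : List String} (h : t ∈ q) :
    dlist (t :: q) = dlist q := by
  simpa [dlist] using foldl_dstep_cons_of_mem q [] t h

lemma dlist_append_singleton (q : List String) (c : String) :
    dlist (q ++ [c]) = dstep (dlist q) c := by
  simp [dlist, List.foldl_append]

lemma filter_ne_of_not_mem {c : String} {l : List String} (h : c ∉ l) :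
    l.filter (fun x => x != c) = l := by
  apply List.filter_eq_self.2
  intro x hx
  simp only [bne_iff_ne, ne_eq]
  exact fun hxc => h (hxc ▸ hx)

lemma length_filter_ne_of_mem {c : String} {l : List String} (hnd : l.Nodup) (h : c ∈ l) :
    l.length = (l.filter (fun x => x != c)).length + 1 := by
  induction l with
  | nil => cases h
  | cons a l ih =>
    rcases List.mem_cons.1 h with h1 | h1
    · subst h1
      have : c ∉ l := (List.nodup_cons.1 hnd).1
      simp [filter_ne_of_not_mem this]
    · have hac : a ≠ c := fun hac => (List.nodup_cons.1 hnd).1 (hac ▸ h1)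
      have := ih (List.nodup_cons.1 hnd).2 h1
      simp [hac, this]

-- the coupling between A's reference-count dict and its queue: counts of the queue
def MemInv (mem : PySem.Dict String Int) (q : List String) : Prop :=
  ∀ c : String, mem.get? c = if 0 < q.count c then some ((q.count c : Nat) : Int) else none

lemma find?_filter_ne (k k' : String) (items : List (String × Int)) :
    (items.filter (fun p => !(p.1 == k))).find? (fun p => p.1 == k') =
    if k' = k then none else items.find? (fun p => p.1 == k') := by
  induction items with
  | nil => simp
  | cons p rest ih =>
    by_cases h1 : p.1 = k <;> by_cases h2 : p.1 = k' <;>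
      simp_all

lemma dict_get?_erase (d : PySem.Dict String Int) (k k' : String) :
    (d.erase k).get? k' = if k' = k then none else d.get? k' := by
  obtain ⟨items⟩ := d
  simp only [PySem.Dict.erase, PySem.Dict.get?, find?_filter_ne]
  by_cases h : k' = k <;> simp [h]

lemma memInv_contains {mem : PySem.Dict String Int} {q : List String}
    (h : MemInv mem q) (c : String) :
    (PySem.Dict.keys mem).contains c = true ↔ c ∈ q := by
  constructor
  · intro hc
    have hm : c ∈ mem.keys := by simpa using hc
    have := h c
    by_cases hq : 0 < q.count c
    · exact List.count_pos_iff.1 hq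
    · rw [if_neg hq] at this
      exact absurd hm ((PySem.Dict.get?_eq_none_iff_not_mem_keys mem c).1 this)
  · intro hc
    have hq : 0 < q.count c := List.count_pos_iff.2 hc
    have := h c
    rw [if_pos hq] at this
    have : c ∈ mem.keys := by
      by_contra hnot
      rw [(PySem.Dict.get?_eq_none_iff_not_mem_keys mem c).2 hnot] at this
      cases this
    simpa using this

-- the eviction loop, under the coupling invariant: it drops size - cS entries
-- from the front of the abstracted queue
lemma evictA_spec (cS : Int) : ∀ (q : List String) (size : Int) (mem : PySem.Dict String Int),
    MemInv mem q → size = ((dlist q).length : Int) →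
    MemInv (evictA cS q size mem).2.2 (evictA cS q size mem).1 ∧
    (evictA cS q size mem).2.1 = ((dlist (evictA cS q size mem).1).length : Int) ∧
    dlist (evictA cS q size mem).1 = (dlist q).drop (size - cS).toNat := by
  intro q
  induction q with
  | nil =>
    intro size mem hm hs
    simp [dlist] at hs
    subst hs
    refine ⟨hm, by simp [evictA, dlist], by simp [evictA, dlist]⟩
  | cons t rest ih =>
    intro size mem hm hs
    by_cases hgt : size > cS
    · have hcnt : mem.get? t = some (((rest.count t + 1 : Nat) : Int)) := by
        have := hm t
        simpa [List.count_cons_self] using this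
      have hgetD : mem.getD t 0 = ((rest.count t + 1 : Nat) : Int) := by
        simp [PySem.Dict.getD, hcnt]
      by_cases h1 : rest.count t = 0
      · -- last copy of t in the queue: remove the key
        have htrest : t ∉ rest := List.count_eq_zero.1 h1
        have heq : (mem.getD t 0 == (1 : Int)) = true := by
          simp [hgetD, h1]
        have hd : dlist (t :: rest) = t :: dlist rest := dlist_cons_of_not_mem htrest
        have hstep : evictA cS (t :: rest) size mem = evictA cS rest (size - 1) (mem.erase t) := by
          simp [evictA, hgt, heq]
        have hm' : MemInv (mem.erase t) rest := by
          intro c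
          rw [dict_get?_erase]
          by_cases hc : c = t
          · simp [hc, h1]
          · rw [if_neg hc]
            have htc : ¬ t = c := fun h => hc h.symm
            have hcount : List.count c (t :: rest) = List.count c rest := by
              rw [List.count_cons]
              simp [htc]
            rw [← hcount]
            exact hm c
        have hs' : size - 1 = ((dlist rest).length : Int) := by
          rw [hs, hd]; simp
        obtain ⟨i1, i2, i3⟩ := ih (size - 1) (mem.erase t) hm' hs'
        rw [hstep]
        refine ⟨i1, i2, ?_⟩
        rw [i3, hd]
        have h1' : (size - cS).toNat = (size - 1 - cS).toNat + 1 := by omega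
        rw [h1']
        simp
      · -- t occurs again later: just decrement its count
        have htrest : t ∈ rest := List.count_pos_iff.1 (Nat.pos_of_ne_zero h1)
        have hne : (mem.getD t 0 == (1 : Int)) = false := by
          simp only [hgetD, beq_eq_false_iff_ne, ne_eq]
          intro hcontra
          omega
        have hd : dlist (t :: rest) = dlist rest := dlist_cons_of_mem htrest
        have hstep : evictA cS (t :: rest) size mem =
            evictA cS rest size (mem.insert t (mem.getD t 0 - 1)) := by
          simp [evictA, hgt, hne]
        have hm' : MemInv (mem.insert t (mem.getD t 0 - 1)) rest := by
          intro c
          rw [PySem.Dict.get?_insert]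
          by_cases hc : c = t
          · rw [if_pos hc, hc]
            rw [if_pos (Nat.pos_of_ne_zero h1)]
            rw [hgetD]
            congr 1
            push_cast
            ring
          · rw [if_neg hc]
            have htc : ¬ t = c := fun h => hc h.symm
            have hcount : List.count c (t :: rest) = List.count c rest := by
              rw [List.count_cons]
              simp [htc]
            rw [← hcount]
            exact hm c
        have hs' : size = ((dlist rest).length : Int) := by rw [hs, hd]
        obtain ⟨i1, i2, i3⟩ := ih size _ hm' hs'
        rw [hstep]
        exact ⟨i1, i2, by rw [i3, hd]⟩
    · have hstep : evictA cS (t :: rest) size mem = (t :: rest, size, mem) := by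
        simp [evictA, hgt]
      rw [hstep]
      have h0' : (size - cS).toNat = 0 := by omega
      exact ⟨hm, hs, by rw [h0', List.drop_zero]⟩

-- the coupling between a full A-state and a B-state: B's ordered dict holds exactly
-- the distinct cities of A's queue, in order of last occurrence, all mapped to true
def CoupleInv (cS : Int) (stA : Int × Int × PySem.Dict String Int × List String)
    (stB : Int × PySem.Dict String Bool) : Prop :=
  stA.1 = stB.1 ∧
  MemInv stA.2.2.1 stA.2.2.2 ∧
  stA.2.1 = ((dlist stA.2.2.2).length : Int) ∧
  stB.2.items = (dlist stA.2.2.2).map (fun c => (c, true)) ∧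
  stA.2.1 ≤ cS

lemma keys_of_items_map (cache : PySem.Dict String Bool) (l : List String)
    (h : cache.items = l.map (fun c => (c, true))) : cache.keys = l := by
  rw [PySem.Dict.keys, h, List.map_map]
  exact List.map_id' l

lemma memInv_append_hit {mem : PySem.Dict String Int} {q : List String} {city : String}
    (hm : MemInv mem q) (hc : city ∈ q) :
    MemInv (mem.insert city (mem.getD city 0 + 1)) (q ++ [city]) := by
  intro c
  rw [PySem.Dict.get?_insert]
  by_cases hcc : c = city
  · subst hcc
    have hq : 0 < q.count c := List.count_pos_iff.2 hc
    have hget : mem.getD c 0 = ((q.count c : Nat) : Int) := by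
      have := hm c
      rw [if_pos hq] at this
      simp [PySem.Dict.getD, this]
    rw [if_pos rfl, hget]
    have : (q ++ [c]).count c = q.count c + 1 := by
      simp [List.count_append]
    rw [this, if_pos (by omega)]
    push_cast
    ring_nf
  · rw [if_neg hcc]
    have : (q ++ [city]).count c = q.count c := by
      have hcic : ¬ city = c := fun h => hcc h.symm
      simp [List.count_append, hcic]
    rw [this]
    exact hm c

lemma memInv_append_miss {mem : PySem.Dict String Int} {q : List String} {city : String}
    (hm : MemInv mem q) (hc : city ∉ q) :
    MemInv (mem.insert city 1) (q ++ [city]) := by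
  intro c
  rw [PySem.Dict.get?_insert]
  by_cases hcc : c = city
  · subst hcc
    have h0 : q.count c = 0 := List.count_eq_zero.2 hc
    have : (q ++ [c]).count c = 1 := by simp [List.count_append, h0]
    simp [this]
  · rw [if_neg hcc]
    have : (q ++ [city]).count c = q.count c := by
      have hcic : ¬ city = c := fun h => hcc h.symm
      simp [List.count_append, hcic]
    rw [this]
    exact hm c

-- one step of each loop preserves the coupling
lemma step_preserve (cS : Int) (h0 : 0 ≤ cS) (name : String)
    (stA : Int × Int × PySem.Dict String Int × List String) (stB : Int × PySem.Dict String Bool)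
    (h : CoupleInv cS stA stB) : CoupleInv cS (stepA cS stA name) (stepB cS stB name) := by
  obtain ⟨time, size, mem, q⟩ := stA
  obtain ⟨timeB, cache⟩ := stB
  obtain ⟨ht, hm, hsz, hcache, hle⟩ := h
  simp only at ht hm hsz hcache hle
  subst ht
  have hkeys : cache.keys = dlist q := keys_of_items_map cache (dlist q) hcache
  by_cases hhit : (PySem.Str.lower name) ∈ q
  · -- cache hit in both
    have hA : (PySem.Dict.keys mem).contains (PySem.Str.lower name) = true :=
      (memInv_contains hm _).2 hhit
    have hmemD : (PySem.Str.lower name) ∈ dlist q := (mem_dlist q _).2 hhit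
    have hB : cache.contains (PySem.Str.lower name) = true :=
      (PySem.Dict.contains_iff_mem_keys cache _).2 (by rw [hkeys]; exact hmemD)
    have hAeq : stepA cS (time, size, mem, q) name =
        (time + 1, size, mem.insert (PySem.Str.lower name) (mem.getD (PySem.Str.lower name) 0 + 1),
          q ++ [PySem.Str.lower name]) := by
      simp only [stepA]
      rw [hA, if_pos rfl]
    have hBeq : stepB cS (time, cache) name =
        (time + 1, (cache.erase (PySem.Str.lower name)).insert (PySem.Str.lower name) true) := by
      simp only [stepB]
      rw [hB, if_pos rfl]
    have herased : (cache.erase (PySem.Str.lower name)).items =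
        ((dlist q).filter (fun x => x != PySem.Str.lower name)).map (fun c => (c, true)) := by
      show (cache.items.filter _) = _
      rw [hcache, List.filter_map]
      rfl
    have hnc : (cache.erase (PySem.Str.lower name)).contains (PySem.Str.lower name) = false := by
      rw [← Bool.not_eq_true, PySem.Dict.contains_iff_mem_keys,
        keys_of_items_map _ _ herased]
      simp
    have hitems : ((cache.erase (PySem.Str.lower name)).insert (PySem.Str.lower name) true).items =
        (dstep (dlist q) (PySem.Str.lower name)).map (fun c => (c, true)) := by
      rw [PySem.Dict.items_insert_of_not_contains _ _ hnc, herased, dstep]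
      simp
    rw [hAeq, hBeq]
    refine ⟨rfl, memInv_append_hit hm hhit, ?_, ?_, hle⟩
    · show size = ((dlist (q ++ [PySem.Str.lower name])).length : Int)
      rw [dlist_append_singleton]
      have hlf := length_filter_ne_of_mem (nodup_dlist q) hmemD
      simp only [dstep, List.length_append, List.length_cons, List.length_nil]
      omega
    · show ((cache.erase (PySem.Str.lower name)).insert (PySem.Str.lower name) true).items =
        (dlist (q ++ [PySem.Str.lower name])).map (fun c => (c, true))
      rw [dlist_append_singleton, hitems]
  · -- cache miss in both
    have hA : (PySem.Dict.keys mem).contains (PySem.Str.lower name) = false := by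
      rw [← Bool.not_eq_true]
      intro hc
      exact hhit ((memInv_contains hm _).1 hc)
    have hmemD : (PySem.Str.lower name) ∉ dlist q := fun h => hhit ((mem_dlist q _).1 h)
    have hB : cache.contains (PySem.Str.lower name) = false := by
      rw [← Bool.not_eq_true, PySem.Dict.contains_iff_mem_keys, hkeys]
      exact hmemD
    have hdq : dlist (q ++ [PySem.Str.lower name]) = dlist q ++ [PySem.Str.lower name] := by
      rw [dlist_append_singleton]
      simp [dstep, filter_ne_of_not_mem hmemD]
    have hlen : ((dlist (q ++ [PySem.Str.lower name])).length : Int) = size + 1 := by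
      rw [hdq]; simp [hsz]
    have hminv' : MemInv (mem.insert (PySem.Str.lower name) 1) (q ++ [PySem.Str.lower name]) :=
      memInv_append_miss hm hhit
    have hins : (cache.insert (PySem.Str.lower name) true).items =
        (dlist q ++ [PySem.Str.lower name]).map (fun c => (c, true)) := by
      rw [PySem.Dict.items_insert_of_not_contains _ _ hB, hcache]
      simp
    have hsize : (((cache.insert (PySem.Str.lower name) true).size : Nat) : Int) = size + 1 := by
      show ((((cache.insert (PySem.Str.lower name) true).items.length : Nat)) : Int) = size + 1
      rw [hins]
      simp [hsz]
    by_cases hfull : size + 1 > cS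
    · -- eviction in A, one pop (or no insertion at all when cS = 0) in B
      obtain ⟨i1, i2, i3⟩ := evictA_spec cS (q ++ [PySem.Str.lower name]) (size + 1)
        (mem.insert (PySem.Str.lower name) 1) hminv' hlen.symm
      have hdrop : dlist (evictA cS (q ++ [PySem.Str.lower name]) (size + 1)
          (mem.insert (PySem.Str.lower name) 1)).1 =
          (dlist (q ++ [PySem.Str.lower name])).drop 1 := by
        rw [i3]
        congr 1
        omega
      rcases hev : evictA cS (q ++ [PySem.Str.lower name]) (size + 1)
        (mem.insert (PySem.Str.lower name) 1) with ⟨q'', size'', mem''⟩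
      rw [hev] at i1 i2 hdrop
      simp only at i1 i2 hdrop
      have hAeq : stepA cS (time, size, mem, q) name = (time + 5, size'', mem'', q'') := by
        simp only [stepA, hA, Bool.false_eq_true, if_false]
        rw [if_pos hfull, hev]
      have hsz'' : size'' = size := by
        rw [i2, hdrop, hdq]
        simp only [List.length_drop, List.length_append, List.length_cons, List.length_nil]
        omega
      by_cases hcs0 : cS > 0
      · have hlengt : (((cache.insert (PySem.Str.lower name) true).size : Nat) : Int) > cS := by
          rw [hsize]; omega
        have hBeq : stepB cS (time, cache) name =
            (time + 5, PySem.Dict.mk ((cache.insert (PySem.Str.lower name) true).items.drop 1)) := by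
          simp only [stepB, hB, Bool.false_eq_true, if_false]
          rw [if_pos hcs0, if_pos hlengt]
        rw [hAeq, hBeq]
        refine ⟨rfl, i1, i2, ?_, show size'' ≤ cS by omega⟩
        show ((cache.insert (PySem.Str.lower name) true).items.drop 1) =
          (dlist q'').map (fun c => (c, true))
        rw [hins, hdrop, hdq, ← List.map_drop]
      · -- cS = 0: A evicts everything; B caches nothing
        have hcs : cS = 0 := by omega
        have hdq0 : dlist q = [] := by
          have h1 : ((dlist q).length : Int) = 0 := by omega
          exact List.length_eq_zero_iff.1 (by exact_mod_cast h1)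
        have hBeq : stepB cS (time, cache) name = (time + 5, cache) := by
          simp only [stepB, hB, Bool.false_eq_true, if_false]
          rw [if_neg hcs0]
        rw [hAeq, hBeq]
        have hq0 : q = [] := by
          rcases q with _ | ⟨a, q⟩
          · rfl
          · exfalso
            have : a ∈ dlist (a :: q) := (mem_dlist _ a).2 (by simp)
            rw [hdq0] at this
            cases this
        have hdone : dlist (q ++ [PySem.Str.lower name]) = [PySem.Str.lower name] := by
          rw [hq0]
          simp [dlist, dstep]
        refine ⟨rfl, i1, i2, ?_, show size'' ≤ cS by omega⟩
        show cache.items = (dlist q'').map (fun c => (c, true))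
        rw [hcache, hdrop, hdone, hdq0]
        simp
    · -- room left: plain insertion in both
      have hcs0 : cS > 0 := by omega
      have hAeq : stepA cS (time, size, mem, q) name =
          (time + 5, size + 1, mem.insert (PySem.Str.lower name) 1,
            q ++ [PySem.Str.lower name]) := by
        simp only [stepA, hA, Bool.false_eq_true, if_false]
        rw [if_neg hfull]
      have hlenle : ¬ ((((cache.insert (PySem.Str.lower name) true).size : Nat) : Int) > cS) := by
        rw [hsize]; omega
      have hBeq : stepB cS (time, cache) name =
          (time + 5, cache.insert (PySem.Str.lower name) true) := by
        simp only [stepB, hB, Bool.false_eq_true, if_false]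
        rw [if_pos hcs0, if_neg hlenle]
      rw [hAeq, hBeq]
      refine ⟨rfl, hminv', by rw [hlen], ?_, show size + 1 ≤ cS by omega⟩
      show (cache.insert (PySem.Str.lower name) true).items =
        (dlist (q ++ [PySem.Str.lower name])).map (fun c => (c, true))
      rw [hins, hdq]

lemma foldl_eq (cS : Int) (h0 : 0 ≤ cS) (cities : List String) :
    ∀ stA stB, CoupleInv cS stA stB →
    (cities.foldl (stepA cS) stA).1 = (cities.foldl (stepB cS) stB).1 := by
  induction cities with
  | nil => intro stA stB h; exact h.1
  | cons name cities ih =>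
    intro stA stB h
    exact ih _ _ (step_preserve cS h0 name stA stB h)

lemma inv_init (cS : Int) (h0 : 0 ≤ cS) :
    CoupleInv cS (0, 0, PySem.Dict.empty, []) (0, PySem.Dict.empty) := by
  refine ⟨rfl, ?_, by simp [dlist], by simp [dlist, PySem.Dict.empty], h0⟩
  intro c
  simp [PySem.Dict.get?_empty]

-- ===== VERDICT (by name: the statement is the Claim_ definition above) =====
theorem solution_spec : Claim_equal_solution := by
  intro cS cities _hdom hpre
  unfold Spec_solution solution solution_alt
  rcases hpre with h0 | hnil
  · exact foldl_eq cS h0 cities _ _ (inv_init cS h0)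
  · subst hnil
    rfl
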